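-- pv_equiv track=rewrite | github.com/rishipython/atlas | experiment/build_synth_sft.py | _strip_long_fenced_blocks
-- ===== SOURCE A (Python) =====
-- def _strip_long_fenced_blocks(text: str) -> str:
--     """Truncate at the first ```-fenced block whose content exceeds 3 lines.
--
--     Short inline fences (e.g. a 1-4 line sketch) are kept because they
--     mirror the style of real gpt-oss-20b reasoning.  A long fenced
--     block, though, is almost always the model giving up on the
--     "no final code" instruction and dumping the kernel — we chop it.
--     """
--     lines = text.splitlines()
--     out: list[str] = []
--     i = 0
--     while i < len(lines):
--         line = lines[i]
--         if line.strip().startswith("```"):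
--             # Find the closing fence
--             j = i + 1
--             while j < len(lines) and not lines[j].strip().startswith("```"):
--                 j += 1
--             block_len = j - i - 1  # inner content lines
--             if block_len > 3:
--                 # Long code block — truncate everything from here.
--                 break
--             # Short block; keep verbatim including the closing fence (if present).
--             out.extend(lines[i : j + 1])
--             i = j + 1
--             continue
--         out.append(line)
--         i += 1
--     return "\n".join(out)
-- ===== SOURCE B (Python) =====
-- def _strip_long_fenced_blocks(text: str) -> str:
--     lines = text.splitlines()
--     fences = [i for i, l in enumerate(lines) if l.strip().startswith("```")]
--     cut = len(lines)
--     k = 0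
--     while k < len(fences):
--         o = fences[k]
--         c = fences[k + 1] if k + 1 < len(fences) else len(lines)
--         if c - o - 1 > 3:
--             cut = o
--             break
--         k += 2
--     return "\n".join(lines[:cut])
-- ===== Notes on version B (the rewrite author's own statement) =====
-- stated objective: simpler
-- what changed: Replaces A's nested index-walking while loops (copying kept lines one by one into an out list) by a prebuilt list of fence-line indices walked in open/close pairs to compute a single cut index, returning the joined prefix lines[:cut].
import Mathlib
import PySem

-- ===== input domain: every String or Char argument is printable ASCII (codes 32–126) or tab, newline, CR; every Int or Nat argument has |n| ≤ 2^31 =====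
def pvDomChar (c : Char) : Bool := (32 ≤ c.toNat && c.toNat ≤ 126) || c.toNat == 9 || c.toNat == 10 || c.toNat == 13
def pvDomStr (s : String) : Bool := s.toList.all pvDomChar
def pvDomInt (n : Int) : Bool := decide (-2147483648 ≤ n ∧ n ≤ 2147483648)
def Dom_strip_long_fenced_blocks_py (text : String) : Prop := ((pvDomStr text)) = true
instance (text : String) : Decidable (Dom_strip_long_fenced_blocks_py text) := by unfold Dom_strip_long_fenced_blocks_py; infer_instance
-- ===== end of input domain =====

-- B replaces A's nested index-walking while loops by a prebuilt list of fence-line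
-- indices walked in open/close pairs to find a single cut index (objective: simpler).

-- ===== PORT A =====
-- line.strip().startswith("```")
def fenceL (l : String) : Bool := PySem.Str.startswith (PySem.Str.strip l) "```"

-- the inner `while j < len(lines) and not fence: j += 1` as the count of leading non-fence lines
def scanCloseA (xs : List String) : Nat :=
  match xs with
  | [] => 0
  | l :: rest => if fenceL l then 0 else scanCloseA rest + 1

-- A's outer while loop over (i, out), expressed on the suffix lines[i:]
def loopA (xs : List String) : List String :=
  match xs with
  | [] => []
  | line :: rest =>
    if fenceL line then
      let j := scanCloseA rest
      if j > 3 then []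
      else (line :: rest.take (j + 1)) ++ loopA (rest.drop (j + 1))
    else line :: loopA rest
termination_by xs.length
decreasing_by
  all_goals simp

def strip_long_fenced_blocks_py (text : String) : String :=
  PySem.Str.join "\n" (loopA (PySem.Str.splitlines text))

-- ===== PORT B =====
-- fences = [i for i, l in enumerate(lines) if l.strip().startswith("```")]
def fenceIdxB (lines : List String) : List Int :=
  (PySem.List.enumerate lines).filterMap (fun p => if fenceL p.2 then some p.1 else none)

-- the pair-walking while loop over the fence-index list; n = len(lines)
def cutB (n : Int) (fs : List Int) : Int :=
  match fs with
  | [] => n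
  | [o] => if n - o - 1 > 3 then o else n
  | o :: c :: rest => if c - o - 1 > 3 then o else cutB n rest

def strip_long_fenced_blocks_py_alt (text : String) : String :=
  let lines := PySem.Str.splitlines text
  PySem.Str.join "\n" (PySem.List.slice lines none (some (cutB lines.length (fenceIdxB lines))))

-- ===== PRECONDITION & SPEC =====
def Spec_strip_long_fenced_blocks_py (text : String) (out : String) : Prop := out = strip_long_fenced_blocks_py_alt text
instance (text : String) (out : String) : Decidable (Spec_strip_long_fenced_blocks_py text out) := by unfold Spec_strip_long_fenced_blocks_py; infer_instance

-- ===== CLAIM (what is proved, stated in full; the proofs are below) =====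
def Claim_equal_strip_long_fenced_blocks_py : Prop := ∀ (text : String), Dom_strip_long_fenced_blocks_py text → Spec_strip_long_fenced_blocks_py text (strip_long_fenced_blocks_py text)

-- ===== LEMMAS AND PROOFS =====

-- fenceIdxB generalized over the enumerate start index
def fiAux (xs : List String) (s : Int) : List Int :=
  (PySem.List.enumerate xs s).filterMap (fun p => if fenceL p.2 then some p.1 else none)

theorem fiAux_nil (s : Int) : fiAux [] s = [] := by
  simp [fiAux, PySem.List.enumerate_nil]

theorem fiAux_cons (x : String) (xs : List String) (s : Int) :
    fiAux (x :: xs) s = (if fenceL x then [s] else []) ++ fiAux xs (s + 1) := by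
  simp only [fiAux, PySem.List.enumerate_cons, List.filterMap_cons]
  by_cases hf : fenceL x <;> simp [hf]

theorem mem_fiAux_ge {xs : List String} {s o : Int} (h : o ∈ fiAux xs s) : s ≤ o := by
  induction xs generalizing s with
  | nil => simp [fiAux_nil] at h
  | cons x xs ih =>
    rw [fiAux_cons] at h
    rcases List.mem_append.1 h with h1 | h2
    · split at h1 <;> simp at h1; omega
    · have := ih h2; omega

theorem cutB_mem (n : Int) : ∀ (fs : List Int), cutB n fs = n ∨ cutB n fs ∈ fs
  | [] => by simp [cutB]
  | [o] => by
      simp only [cutB]; split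
      · right; simp
      · left; rfl
  | o :: c :: rest => by
      simp only [cutB]; split
      · right; simp
      · rcases cutB_mem n rest with h | h
        · left; exact h
        · right; simp [h]

-- no fence in xs ↔ fiAux empty; then the inner scan runs to the end
theorem fiAux_nil_scan {xs : List String} {s : Int} (h : fiAux xs s = []) :
    scanCloseA xs = xs.length := by
  induction xs generalizing s with
  | nil => simp [scanCloseA]
  | cons x xs ih =>
    rw [fiAux_cons] at h
    by_cases hf : fenceL x
    · simp [hf] at h
    · simp [hf] at h
      simp [scanCloseA, hf, ih h]

-- decomposition at the first fence of xs
theorem fiAux_cons_elim {xs : List String} {s c : Int} {fs : List Int}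
    (h : fiAux xs s = c :: fs) :
    ∃ (u v : List String) (m : String),
      xs = u ++ m :: v ∧ (∀ l ∈ u, fenceL l = false) ∧ fenceL m = true ∧
      c = s + u.length ∧ fs = fiAux v (c + 1) ∧ scanCloseA xs = u.length := by
  induction xs generalizing s c fs with
  | nil => simp [fiAux_nil] at h
  | cons x xs ih =>
    rw [fiAux_cons] at h
    by_cases hf : fenceL x
    · simp only [if_pos hf, List.singleton_append, List.cons.injEq] at h
      exact ⟨[], xs, x, by simp, by simp, hf, by simp [h.1], by rw [h.1] at h; simp [h.2], by simp [scanCloseA, hf]⟩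
    · simp only [if_neg hf, List.nil_append] at h
      obtain ⟨u, v, m, hxs, hu, hm, hc, hfs, hscan⟩ := ih h
      refine ⟨x :: u, v, m, by simp [hxs], ?_, hm, by simp only [List.length_cons]; omega,
        hfs, by simp [scanCloseA, hf, hscan]⟩
      intro l hl
      rcases List.mem_cons.1 hl with rfl | hl
      · simpa using hf
      · exact hu l hl

-- main invariant: A's loop over a suffix equals the prefix up to B's cut, for any start index s
theorem main_loop (xs : List String) (s : Int) :
    loopA xs = xs.take ((cutB (s + xs.length) (fiAux xs s) - s).toNat) := by
  induction hn : xs.length using Nat.strong_induction_on generalizing xs s with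
  | _ n ih =>
  subst hn
  match xs with
  | [] => simp [loopA, fiAux_nil, cutB]
  | x :: rest =>
    rw [loopA, fiAux_cons]
    by_cases hf : fenceL x
    · rw [if_pos hf, if_pos hf]
      cases hrest : fiAux rest (s + 1) with
      | nil =>
        have hscan := fiAux_nil_scan hrest
        simp only [List.singleton_append, hscan]
        by_cases hlen : rest.length > 3
        · rw [show cutB (s + ↑(x :: rest).length) [s] = s from by
            simp only [cutB, List.length_cons]
            rw [if_pos (by push_cast; omega)]]
          simp [hlen]
        · have hc : cutB (s + ↑(x :: rest).length) [s] = s + ↑(x :: rest).length := by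
            simp only [cutB, List.length_cons]
            rw [if_neg (by push_cast; omega)]
          rw [hc]
          have hl0 : loopA [] = [] := by rw [loopA]
          have h1 : List.take (rest.length + 1) rest = rest :=
            List.take_of_length_le (by omega)
          have h2 : List.drop (rest.length + 1) rest = [] :=
            List.drop_eq_nil_of_le (by omega)
          rw [if_neg hlen, h1, h2, hl0, List.append_nil]
          rw [show ((s + ↑(x :: rest).length - s).toNat) = rest.length + 1 from by
            simp only [List.length_cons]; push_cast; omega]
          rw [List.take_succ_cons, List.take_of_length_le (by omega)]
      | cons c fs =>
        obtain ⟨u, v, m, hxs, hu, hm, hc, hfs, hscan⟩ := fiAux_cons_elim hrest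
        simp only [List.singleton_append, hscan]
        by_cases hlong : u.length > 3
        · rw [show cutB (s + ↑(x :: rest).length) (s :: c :: fs) = s from by
            simp only [cutB]
            rw [if_pos (by omega)]]
          simp [hlong]
        · have hcut : cutB (s + ↑(x :: rest).length) (s :: c :: fs) =
              cutB (s + ↑(x :: rest).length) fs := by
            simp only [cutB]
            rw [if_neg (by omega)]
          have hn' : s + ((x :: rest).length : Int) = (c + 1) + v.length := by
            subst hxs; simp only [List.length_cons, List.length_append]; push_cast; omega
          have ihv := ih v.length (by subst hxs; simp; omega) v (c + 1) rfl
          have hge : c + 1 ≤ cutB ((c+1) + (v.length : Int)) (fiAux v (c+1)) := by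
            rcases cutB_mem ((c+1) + (v.length : Int)) (fiAux v (c+1)) with h | h
            · omega
            · exact mem_fiAux_ge h
          set cv := cutB ((c+1) + (v.length : Int)) (fiAux v (c+1)) with hcv
          rw [hcut, hfs, hn', ← hcv]
          rw [if_neg hlong]
          subst hxs
          have htk : (u ++ m :: v).take (u.length + 1) = u ++ [m] := by
            rw [List.take_length_add_append]; simp
          have hdr : (u ++ m :: v).drop (u.length + 1) = v := by
            rw [List.drop_length_add_append]; rfl
          rw [htk, hdr, ihv]
          have hnat : (cv - s).toNat = (u.length + (1 + (cv - (c+1)).toNat)) + 1 := by omega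
          rw [hnat, List.take_succ_cons, List.take_length_add_append]
          rw [show (1 + (cv - (c+1)).toNat) = (cv - (c+1)).toNat + 1 from by omega]
          rw [List.take_succ_cons]
          simp
    · rw [if_neg hf, if_neg hf, List.nil_append]
      have ihr := ih rest.length (by simp) rest (s + 1) rfl
      have hn' : s + ((x :: rest).length : Int) = (s + 1) + rest.length := by
        simp only [List.length_cons]; push_cast; omega
      have hge : s + 1 ≤ cutB ((s + 1) + (rest.length : Int)) (fiAux rest (s+1)) := by
        rcases cutB_mem ((s + 1) + (rest.length : Int)) (fiAux rest (s+1)) with h | h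
        · omega
        · exact mem_fiAux_ge h
      rw [hn', ihr]
      set cv := cutB ((s+1) + (rest.length : Int)) (fiAux rest (s+1))
      have hnat : (cv - s).toNat = (cv - (s+1)).toNat + 1 := by omega
      rw [hnat, List.take_succ_cons]

-- ===== VERDICT (by name: the statement is the Claim_ definition above) =====
theorem strip_long_fenced_blocks_py_spec : Claim_equal_strip_long_fenced_blocks_py := by
  intro text _
  show strip_long_fenced_blocks_py text = strip_long_fenced_blocks_py_alt text
  have h0 := main_loop (PySem.Str.splitlines text) 0
  have hge : 0 ≤ cutB (((PySem.Str.splitlines text).length : Int))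
      (fenceIdxB (PySem.Str.splitlines text)) := by
    rcases cutB_mem (((PySem.Str.splitlines text).length : Int))
        (fenceIdxB (PySem.Str.splitlines text)) with h | h
    · omega
    · exact mem_fiAux_ge (s := 0) h
  simp only [strip_long_fenced_blocks_py, strip_long_fenced_blocks_py_alt, h0]
  norm_num
  rw [PySem.List.slice_to _ hge]
  rfl
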